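-- pv_equiv track=rewrite | github.com/kyoonge/Study | Programmers/BruteForce/mocktest.py | solution
-- ===== SOURCE A (Python) =====
-- def solution(answers):
--     c1,c2,c3=0,0,0
--     answer = []
--     maxc =0
--     list1 = [1,2,3,4,5]*(10000//5)
--     list2 = [2,1,2,3,2,4,2,5]*(10000//8)
--     list3 = [3,3,1,1,2,2,4,4,5,5]*(10000//10)
--
--     for i in range(len(answers)):
--         if answers[i]==list1[i]:
--             c1+=1
--         if answers[i]==list2[i]:
--             c2+=1
--         if answers[i]==list3[i]:
--             c3+=1
--     maxc=max(c1,c2,c3)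
--     if c1==maxc: answer.append(1)
--     if c2==maxc: answer.append(2)
--     if c3==maxc: answer.append(3)
--
--
--     return answer
-- ===== SOURCE B (Python) =====
-- def solution(answers):
--     # The three base patterns repeat with periods 5, 8, 10, so the combined
--     # period is 40: aggregate the answers into a histogram keyed by
--     # (position mod 40, value) in one pass, then read each pattern's score
--     # off the 40-entry table instead of comparing answer by answer.
--     cnt = {}
--     for i, a in enumerate(answers):
--         k = (i % 40, a)
--         cnt[k] = cnt.get(k, 0) + 1
--     pats = [[1, 2, 3, 4, 5], [2, 1, 2, 3, 2, 4, 2, 5], [3, 3, 1, 1, 2, 2, 4, 4, 5, 5]]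
--     scores = [sum(cnt.get((r, p[r % len(p)]), 0) for r in range(40)) for p in pats]
--     m = max(scores)
--     return [k + 1 for k, s in enumerate(scores) if s == m]
-- ===== Notes on version B (the rewrite author's own statement) =====
-- stated objective: alternative
-- what changed: Replaces A's answer-major loop over three 10000-element materialized pattern lists (three counters updated per answer) by a one-pass histogram keyed by (index mod 40, value) - 40 being the common period of the three patterns - from which each pattern's score is read as a 40-entry table sum, then max and a filter over enumerated scores.
import Mathlib
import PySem

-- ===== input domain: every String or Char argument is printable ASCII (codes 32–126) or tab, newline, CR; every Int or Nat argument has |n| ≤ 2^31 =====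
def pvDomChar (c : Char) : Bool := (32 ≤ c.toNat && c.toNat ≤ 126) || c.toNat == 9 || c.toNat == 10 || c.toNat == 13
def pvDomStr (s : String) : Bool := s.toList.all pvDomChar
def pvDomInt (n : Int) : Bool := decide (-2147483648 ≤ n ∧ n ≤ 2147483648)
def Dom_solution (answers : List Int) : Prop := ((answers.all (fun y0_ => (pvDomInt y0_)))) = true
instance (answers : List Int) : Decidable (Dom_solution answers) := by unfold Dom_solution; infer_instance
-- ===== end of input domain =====

-- B replaces A's answer-major loop over three 10000-long materialized pattern lists by a
-- one-pass histogram keyed by (index mod 40, value) from which each pattern's score is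
-- read as a 40-entry table sum (objective: alternative algorithm, same asymptotic cost).


-- ===== PORT A =====
-- [1,2,3,4,5]*(10000//5) etc.: Python list repetition = flatten of replicate
def pvList1 : List Int := (List.replicate (10000/5) ([1,2,3,4,5] : List Int)).flatten
def pvList2 : List Int := (List.replicate (10000/8) ([2,1,2,3,2,4,2,5] : List Int)).flatten
def pvList3 : List Int := (List.replicate (10000/10) ([3,3,1,1,2,2,4,4,5,5] : List Int)).flatten

-- body of A's for-loop over range(len(answers)); pyGetD is answers[i]/listk[i]
-- (in range under Pre_solution)
def pvStepA (answers : List Int) (c : Int × Int × Int) (i : Int) : Int × Int × Int :=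
  let c1 := if PySem.List.pyGetD answers i 0 = PySem.List.pyGetD pvList1 i 0 then c.1 + 1 else c.1
  let c2 := if PySem.List.pyGetD answers i 0 = PySem.List.pyGetD pvList2 i 0 then c.2.1 + 1 else c.2.1
  let c3 := if PySem.List.pyGetD answers i 0 = PySem.List.pyGetD pvList3 i 0 then c.2.2 + 1 else c.2.2
  (c1, c2, c3)

def solution (answers : List Int) : List Int :=
  let cs := (PySem.List.pyRange 0 (answers.length : Int) 1).foldl (pvStepA answers) (0, 0, 0)
  let maxc := max (max cs.1 cs.2.1) cs.2.2
  let a1 : List Int := if cs.1 = maxc then [] ++ [1] else []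
  let a2 := if cs.2.1 = maxc then a1 ++ [2] else a1
  let a3 := if cs.2.2 = maxc then a2 ++ [3] else a2
  a3

-- ===== PORT B =====
-- the histogram loop: cnt[(i % 40, a)] = cnt.get((i % 40, a), 0) + 1
def pvBuildCnt (answers : List Int) : PySem.Dict (Int × Int) Int :=
  (PySem.List.enumerate answers 0).foldl
    (fun d ia =>
      d.insert (PySem.Int.mod ia.1 40, ia.2)
        (d.getD (PySem.Int.mod ia.1 40, ia.2) 0 + 1))
    PySem.Dict.empty

-- sum(cnt.get((r, p[r % len(p)]), 0) for r in range(40))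
def pvScoreC (cnt : PySem.Dict (Int × Int) Int) (p : List Int) : Int :=
  ((PySem.List.pyRange 0 40 1).map
    (fun r => cnt.getD (r, PySem.List.pyGetD p (PySem.Int.mod r (p.length : Int)) 0) 0)).sum

def solution_alt (answers : List Int) : List Int :=
  let cnt := pvBuildCnt answers
  let pats : List (List Int) := [[1,2,3,4,5],[2,1,2,3,2,4,2,5],[3,3,1,1,2,2,4,4,5,5]]
  let scores := pats.map (pvScoreC cnt)
  let m := (PySem.List.max? scores (fun x => x)).getD 0
  ((PySem.List.enumerate scores 0).filter (fun ks => decide (ks.2 = m))).map (fun ks => ks.1 + 1)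

-- ===== PRECONDITION & SPEC =====
-- A indexes its three 10000-element pattern lists at every i < len(answers), so it
-- raises IndexError iff len(answers) > 10000; exactly those inputs are excluded.
def Pre_solution (answers : List Int) : Prop := answers.length ≤ 10000
instance (answers : List Int) : Decidable (Pre_solution answers) := by unfold Pre_solution; infer_instance
def pvWitness_solution : List Int := [1, 3, 2, 4, 2]

def Spec_solution (answers : List Int) (out : List Int) : Prop := out = solution_alt answers
instance (answers : List Int) (out : List Int) : Decidable (Spec_solution answers out) := by unfold Spec_solution; infer_instance

-- ===== CLAIM (what is proved, stated in full; the proofs are below) =====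
def Claim_equal_solution : Prop := ∀ (answers : List Int), Dom_solution answers → Pre_solution answers → Spec_solution answers (solution answers)

-- ===== LEMMAS AND PROOFS =====

-- proof-side bridge: the match count of answers against the cyclic pattern p
def pvScoreB (answers : List Int) (p : List Int) : Int :=
  ((PySem.List.enumerate answers 0).map
    (fun ia => if ia.2 = PySem.List.pyGetD p (PySem.Int.mod ia.1 (p.length : Int)) 0 then (1 : Int) else 0)).sum

-- indexing a repeated pattern = modulo indexing into the pattern
lemma getD_flatten_replicate (p : List Int) (n k : Nat) (h : k < n * p.length) :
    ((List.replicate n p).flatten).getD k 0 = p.getD (k % p.length) 0 := by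
  induction n generalizing k with
  | zero => omega
  | succ m ih =>
    rw [List.replicate_succ, List.flatten_cons]
    have hp : 0 < p.length := by by_contra h0; simp at h0; simp [h0] at h
    by_cases hk : k < p.length
    · rw [List.getD_eq_getElem?_getD, List.getElem?_append_left hk, Nat.mod_eq_of_lt hk,
        ← List.getD_eq_getElem?_getD]
    · rw [List.getD_eq_getElem?_getD, List.getElem?_append_right (by omega),
        ← List.getD_eq_getElem?_getD]
      rw [ih (k - p.length) (by rw [Nat.succ_mul] at h; omega)]
      congr 1
      conv_rhs => rw [show k = (k - p.length) + 1 * p.length by omega]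
      rw [Nat.add_mul_mod_self_right]

-- one appended element extends each pattern score by its match indicator
lemma scoreB_append (ys : List Int) (y : Int) (p : List Int) (hp : p ≠ []) :
    pvScoreB (ys ++ [y]) p
      = pvScoreB ys p + (if y = p.getD (ys.length % p.length) 0 then (1 : Int) else 0) := by
  have hp' : 0 < p.length := List.length_pos_iff.mpr hp
  unfold pvScoreB
  rw [PySem.List.enumerate_append, List.map_append, List.sum_append]
  simp only [PySem.List.enumerate_cons, PySem.List.enumerate_nil, List.map_cons, List.map_nil,
    List.sum_cons, List.sum_nil, zero_add, add_zero]
  have e : PySem.List.pyGetD p (PySem.Int.mod ((ys.length : Int)) (p.length : Int)) 0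
      = p.getD (ys.length % p.length) 0 := by
    rw [PySem.Int.mod_natCast, PySem.List.pyGetD_natCast]
  rw [e]

-- A's counting loop computes exactly the three cyclic-pattern scores
lemma counts_eq (xs : List Int) (h : xs.length ≤ 10000) :
    (PySem.List.pyRange 0 (xs.length : Int) 1).foldl (pvStepA xs) (0, 0, 0)
      = (pvScoreB xs [1,2,3,4,5], pvScoreB xs [2,1,2,3,2,4,2,5], pvScoreB xs [3,3,1,1,2,2,4,4,5,5]) := by
  induction xs using List.reverseRecOn with
  | nil => simp [PySem.List.pyRange, pvScoreB, PySem.List.enumerate_nil]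
  | append_singleton ys y ih =>
    have hlen : ys.length ≤ 10000 - 1 := by simp at h; omega
    have hcast : ((ys ++ [y]).length : Int) = (ys.length : Int) + 1 := by simp
    rw [hcast, PySem.List.pyRange_one_succ_right (by positivity), List.foldl_append]
    have hcong : List.foldl (pvStepA (ys ++ [y])) ((0 : Int), (0 : Int), (0 : Int))
          (PySem.List.pyRange 0 (ys.length : Int) 1)
        = List.foldl (pvStepA ys) (0, 0, 0) (PySem.List.pyRange 0 (ys.length : Int) 1) := by
      apply PySem.List.foldl_congr_mem
      intro acc i hi
      rw [PySem.List.mem_pyRange_one] at hi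
      have h1 : PySem.List.pyGetD (ys ++ [y]) i 0 = PySem.List.pyGetD ys i 0 := by
        rw [PySem.List.pyGetD_eq_getElem _ 0 (by omega) (by simp; omega),
            PySem.List.pyGetD_eq_getElem _ 0 (by omega) (by omega)]
        exact List.getElem_append_left (by omega)
      simp only [pvStepA, h1]
    rw [hcong, ih (by omega)]
    have hy : PySem.List.pyGetD (ys ++ [y]) (ys.length : Int) 0 = y := by
      rw [PySem.List.pyGetD_eq_getElem _ 0 (by positivity) (by simp)]
      simp
    have hl1 : PySem.List.pyGetD pvList1 (ys.length : Int) 0 = ([1,2,3,4,5] : List Int).getD (ys.length % 5) 0 := by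
      rw [PySem.List.pyGetD_natCast, pvList1, getD_flatten_replicate _ _ _ (by simp; omega)]
      norm_num
    have hl2 : PySem.List.pyGetD pvList2 (ys.length : Int) 0 = ([2,1,2,3,2,4,2,5] : List Int).getD (ys.length % 8) 0 := by
      rw [PySem.List.pyGetD_natCast, pvList2, getD_flatten_replicate _ _ _ (by simp; omega)]
      norm_num
    have hl3 : PySem.List.pyGetD pvList3 (ys.length : Int) 0 = ([3,3,1,1,2,2,4,4,5,5] : List Int).getD (ys.length % 10) 0 := by
      rw [PySem.List.pyGetD_natCast, pvList3, getD_flatten_replicate _ _ _ (by simp; omega)]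
      norm_num
    rw [scoreB_append _ _ _ (by simp), scoreB_append _ _ _ (by simp), scoreB_append _ _ _ (by simp)]
    simp only [List.foldl_cons, List.foldl_nil, pvStepA, hy, hl1, hl2, hl3]
    norm_num
    split_ifs <;> simp_all

-- a 0/1 indicator summed over range n picks out the single residue j < n
lemma sum_indicator_range (n j : Nat) (hj : j < n) (v : Int) (f : Int → Int) :
    ((List.range n).map (fun r : Nat => if v = f (r : Int) ∧ j = r then (1 : Int) else 0)).sum
      = if v = f (j : Int) then 1 else 0 := by
  induction n with
  | zero => omega
  | succ m ih =>
    rw [List.range_succ, List.map_append, List.sum_append]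
    by_cases hjm : j = m
    · subst hjm
      have hz : ((List.range j).map (fun r : Nat => if v = f (r : Int) ∧ j = r then (1 : Int) else 0)).sum = 0 := by
        apply List.sum_eq_zero
        intro x hx
        simp only [List.mem_map, List.mem_range] at hx
        obtain ⟨r, hr, hx⟩ := hx
        have hne : j ≠ r := Nat.ne_of_gt hr
        simp [hne] at hx
        omega
      simp [hz]
    · rw [ih (by omega)]
      simp [hjm]

-- a counting fold of inserts keyed by a projection g reads back as a count over l.map g
lemma getD_foldl_insert_key (g : Int × Int → Int × Int) (l : List (Int × Int))
    (d : PySem.Dict (Int × Int) Int) (k : Int × Int) :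
    (l.foldl (fun d ia => d.insert (g ia) (d.getD (g ia) 0 + 1)) d).getD k 0
      = d.getD k 0 + ((l.map g).count k : Int) := by
  induction l generalizing d with
  | nil => simp
  | cons a t ih =>
    rw [List.foldl_cons, ih, List.map_cons, List.count_cons]
    by_cases hk : k = g a
    · simp [hk]
      ring
    · have hne : ¬ (g a == k) = true := by simp [Ne.symm hk]
      simp [PySem.Dict.getD_insert, hk, hne]

-- the histogram lookup is a count over the (index mod 40, value) pairs
lemma buildCnt_getD (xs : List Int) (r v : Int) :
    (pvBuildCnt xs).getD (r, v) 0
      = (((PySem.List.enumerate xs 0).map (fun ia => (PySem.Int.mod ia.1 40, ia.2))).count (r, v) : Int) := by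
  have h := getD_foldl_insert_key (fun ia => (PySem.Int.mod ia.1 40, ia.2))
      (PySem.List.enumerate xs 0) PySem.Dict.empty (r, v)
  unfold pvBuildCnt
  simpa [PySem.Dict.getD_empty] using h

-- summing those counts over all 40 residues recovers the per-element indicator sum
lemma sum_counts_eq_indicator (l : List (Int × Int)) (F : Int → Int) :
    ((List.range 40).map (fun r : Nat =>
        (((l.map (fun ia => (PySem.Int.mod ia.1 40, ia.2))).count ((r : Int), F (r : Int))) : Int))).sum
      = (l.map (fun ia => if ia.2 = F (PySem.Int.mod ia.1 40) then (1 : Int) else 0)).sum := by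
  induction l with
  | nil => simp
  | cons x t ih =>
    simp only [List.map_cons, List.count_cons, List.sum_cons]
    push_cast
    rw [PySem.List.sum_map_add_int, ih]
    have hnn : 0 ≤ PySem.Int.mod x.1 40 := PySem.Int.mod_nonneg x.1 (by norm_num)
    have hlt : PySem.Int.mod x.1 40 < 40 := PySem.Int.mod_lt x.1 (by norm_num)
    have hjc : (((PySem.Int.mod x.1 40).toNat : Nat) : Int) = PySem.Int.mod x.1 40 :=
      Int.toNat_of_nonneg hnn
    have hjlt : (PySem.Int.mod x.1 40).toNat < 40 := by omega
    have hconv : ∀ r : Nat,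
        (if ((PySem.Int.mod x.1 40, x.2) == ((r : Int), F (r : Int))) then (1 : Int) else 0)
          = (if x.2 = F (r : Int) ∧ (PySem.Int.mod x.1 40).toNat = r then (1 : Int) else 0) := by
      intro r
      congr 1
      simp only [beq_iff_eq, Prod.mk.injEq, eq_iff_iff]
      constructor
      · rintro ⟨h1, h2⟩; exact ⟨h2, by omega⟩
      · rintro ⟨h1, h2⟩; exact ⟨by omega, h1⟩
    have hind : ((List.range 40).map (fun r : Nat =>
          if ((PySem.Int.mod x.1 40, x.2) == ((r : Int), F (r : Int))) then (1 : Int) else 0)).sum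
        = if x.2 = F (PySem.Int.mod x.1 40) then 1 else 0 := by
      rw [List.map_congr_left (fun r _ => hconv r),
        sum_indicator_range 40 (PySem.Int.mod x.1 40).toNat hjlt x.2 F, hjc]
    rw [hind]
    ring

-- B's table read equals the cyclic-pattern score (pattern length divides the period 40)
lemma scoreC_eq (xs p : List Int) (hdvd : p.length ∣ 40) (hp : p ≠ []) :
    pvScoreC (pvBuildCnt xs) p = pvScoreB xs p := by
  have hp' : 0 < p.length := List.length_pos_iff.mpr hp
  unfold pvScoreC
  have hrange : PySem.List.pyRange 0 40 1 = (List.range 40).map (fun k : Nat => (k : Int)) := by decide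
  rw [hrange, List.map_map]
  simp only [Function.comp_def, buildCnt_getD]
  rw [sum_counts_eq_indicator (PySem.List.enumerate xs 0)
      (fun r => PySem.List.pyGetD p (PySem.Int.mod r (p.length : Int)) 0)]
  unfold pvScoreB
  apply congrArg List.sum
  apply List.map_congr_left
  intro ia hia
  rw [PySem.List.mem_enumerate_iff] at hia
  obtain ⟨k, hk, rfl⟩ := hia
  simp only [zero_add]
  have h40 : PySem.Int.mod ((k : Nat) : Int) 40 = ((k % 40 : Nat) : Int) := by
    exact_mod_cast PySem.Int.mod_natCast k 40
  have h1 : PySem.Int.mod (PySem.Int.mod ((k : Nat) : Int) 40) (p.length : Int)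
      = PySem.Int.mod ((k : Nat) : Int) (p.length : Int) := by
    rw [h40, PySem.Int.mod_natCast, PySem.Int.mod_natCast, Nat.mod_mod_of_dvd k hdvd]
  rw [h1]

-- assembling the answer list from three scores agrees between the two shapes
lemma final_assemble (s1 s2 s3 : Int) :
    (let maxc := max (max s1 s2) s3
     let a1 : List Int := if s1 = maxc then [] ++ [1] else []
     let a2 := if s2 = maxc then a1 ++ [2] else a1
     let a3 := if s3 = maxc then a2 ++ [3] else a2
     a3)
      = ((PySem.List.enumerate [s1, s2, s3] 0).filter
          (fun ks => decide (ks.2 = (PySem.List.max? [s1, s2, s3] (fun x => x)).getD 0))).map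
          (fun ks => ks.1 + 1) := by
  rw [PySem.List.max?_id_cons]
  simp only [List.foldl_cons, List.foldl_nil, Option.getD_some,
    PySem.List.enumerate_cons, PySem.List.enumerate_nil, List.filter_cons, List.filter_nil,
    decide_eq_true_eq, List.nil_append]
  norm_num
  split_ifs <;> simp

-- ===== VERDICT =====
theorem solution_spec : Claim_equal_solution := by
  intro answers hdom hpre
  unfold Spec_solution
  have h1 := scoreC_eq answers [1,2,3,4,5] (by norm_num) (by simp)
  have h2 := scoreC_eq answers [2,1,2,3,2,4,2,5] (by norm_num) (by simp)
  have h3 := scoreC_eq answers [3,3,1,1,2,2,4,4,5,5] (by norm_num) (by simp)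
  simp only [solution, solution_alt, List.map_cons, List.map_nil, counts_eq answers hpre, h1, h2, h3]
  exact final_assemble _ _ _
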